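-- pv_equiv track=rewrite | github.com/SSAFY-9-S4-STUDY/SWEAB | day26/P_152995/P_152995_Jangwon.py | solution
-- ===== SOURCE A (Python) =====
-- def solution(scores):
--     answer = 1
--
--     target = scores[0]
--     target_score = sum(scores[0])
--     scores.sort(key=lambda x: (-x[0], x[1]))
--
--     bp = 0
--     for score in scores:
--         if target[0] < score[0] and target[1] < score[1]:
--             return -1
--         if bp <= score[1]:
--             if target_score < score[0] + score[1]:
--                 answer += 1
--             bp = score[1]
--     return answer
-- ===== SOURCE B (Python) =====
-- def solution(scores):
--     target = scores[0]
--     target_score = sum(scores[0])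
--     scores.sort(key=lambda x: (-x[0], x[1]))
--     if any(target[0] < q[0] and target[1] < q[1] for q in scores):
--         return -1
--     return 1 + sum(1 for p in scores
--                    if target_score < p[0] + p[1]
--                    and not any(p[0] < q[0] and p[1] < q[1] for q in scores))
-- ===== Notes on version B (the rewrite author's own statement) =====
-- stated objective: alternative
-- what changed: Replaces A's sort-then-running-maximum early-return pass with an explicit brute-force nested domination scan: return -1 iff some entry strictly dominates the first one, else 1 plus the count of non-dominated entries whose two scores sum strictly above the first entry's total.
-- intended difference: On inputs whose first entry is not strictly dominated but some non-dominated entry has a negative second score and a score sum above the first entry's total, A's running maximum starts at 0 and silently skips that entry (returning a too-small count), while B counts it as the ranking rule intends. — e.g. on solution([[0, 0], [2, -1]]): A returns 1, B returns 2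
import Mathlib
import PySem

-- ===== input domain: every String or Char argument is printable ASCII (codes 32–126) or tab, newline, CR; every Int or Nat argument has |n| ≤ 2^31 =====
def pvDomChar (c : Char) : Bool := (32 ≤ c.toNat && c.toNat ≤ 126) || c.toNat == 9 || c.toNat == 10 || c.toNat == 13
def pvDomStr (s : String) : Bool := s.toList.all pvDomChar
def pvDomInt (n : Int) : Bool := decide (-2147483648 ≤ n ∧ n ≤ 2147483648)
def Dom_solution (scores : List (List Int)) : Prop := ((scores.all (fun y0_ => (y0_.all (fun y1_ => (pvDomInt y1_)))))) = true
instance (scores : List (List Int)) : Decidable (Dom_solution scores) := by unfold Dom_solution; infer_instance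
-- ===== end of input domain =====

-- B replaces A's sort-then-running-maximum pass with a brute-force nested domination
-- scan (alternative decomposition, not faster); B's Python reproduces A's in-place sort
-- of `scores`, and the equivalence proved here is about the return value.

-- ===== PORT A =====
def solution (scores : List (List Int)) : Int :=
  let target := PySem.List.pyGetD scores 0 []
  let target_score := target.sum
  let ss := PySem.List.sorted2 scores (fun x => -(PySem.List.pyGetD x 0 0)) (fun x => PySem.List.pyGetD x 1 0) false
  let r := ss.foldl (fun st score =>
    match st with
    | Sum.inl v => Sum.inl v
    | Sum.inr (answer, bp) =>
      if PySem.List.pyGetD target 0 0 < PySem.List.pyGetD score 0 0 ∧ PySem.List.pyGetD target 1 0 < PySem.List.pyGetD score 1 0 then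
        Sum.inl (-1 : Int)
      else if bp ≤ PySem.List.pyGetD score 1 0 then
        Sum.inr (if target_score < PySem.List.pyGetD score 0 0 + PySem.List.pyGetD score 1 0 then answer + 1 else answer, PySem.List.pyGetD score 1 0)
      else Sum.inr (answer, bp)) (Sum.inr ((1 : Int), (0 : Int)) : Sum Int (Int × Int))
  match r with
  | Sum.inl v => v
  | Sum.inr (answer, _) => answer

-- ===== PORT B =====
def solution_alt (scores : List (List Int)) : Int :=
  let target := PySem.List.pyGetD scores 0 []
  let target_score := target.sum
  let ss := PySem.List.sorted2 scores (fun x => -(PySem.List.pyGetD x 0 0)) (fun x => PySem.List.pyGetD x 1 0) false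
  if ss.any (fun q => decide (PySem.List.pyGetD target 0 0 < PySem.List.pyGetD q 0 0) && decide (PySem.List.pyGetD target 1 0 < PySem.List.pyGetD q 1 0)) then
    -1
  else
    1 + ((ss.filter (fun p => decide (target_score < PySem.List.pyGetD p 0 0 + PySem.List.pyGetD p 1 0) &&
          !(ss.any (fun q => decide (PySem.List.pyGetD p 0 0 < PySem.List.pyGetD q 0 0) && decide (PySem.List.pyGetD p 1 0 < PySem.List.pyGetD q 1 0))))).length : Int)

-- ===== PRECONDITION & SPEC =====
-- Pre_ excludes exactly the inputs where the Python A raises: IndexError on an empty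
-- list (scores[0]) or on any inner list of length < 2 (x[0]/x[1] in the sort key).
def Pre_solution (scores : List (List Int)) : Prop :=
  scores ≠ [] ∧ ∀ s ∈ scores, 2 ≤ s.length
instance (scores : List (List Int)) : Decidable (Pre_solution scores) := by unfold Pre_solution; infer_instance
def pvWitness_solution : List (List Int) := [[1, 2]]

-- On inputs whose first entry is not strictly dominated but some non-dominated entry has a
-- negative second score and score sum above the first entry's, A's running maximum starts at 0
-- and silently skips that entry (returning a too-small count), while B counts it as the ranking
-- rule intends.
def D_solution (scores : List (List Int)) : Prop :=
  ∃ p ∈ scores, p.getD 1 0 < 0 ∧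
    (scores.getD 0 []).sum < p.getD 0 0 + p.getD 1 0 ∧
    ∀ q ∈ scores, (q.getD 0 0 ≤ (scores.getD 0 []).getD 0 0 ∨ q.getD 1 0 ≤ (scores.getD 0 []).getD 1 0) ∧
                  (q.getD 0 0 ≤ p.getD 0 0 ∨ q.getD 1 0 ≤ p.getD 1 0)
instance (scores : List (List Int)) : Decidable (D_solution scores) := by unfold D_solution; infer_instance

def Spec_solution (scores : List (List Int)) (out : Int) : Prop := ¬ D_solution scores → out = solution_alt scores
instance (scores : List (List Int)) (out : Int) : Decidable (Spec_solution scores out) := by unfold Spec_solution; infer_instance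

def pvDiffWitness_solution : List (List Int) := [[0, 0], [2, -1]]
def pvDiffWitnessOut_solution : Int × Int := (1, 2)

-- ===== CLAIM (what is proved, stated in full; the proofs are below) =====
def Claim_unchanged_solution : Prop := ∀ (scores : List (List Int)), Dom_solution scores → Pre_solution scores → Spec_solution scores (solution scores)
def Claim_changed_solution : Prop := Dom_solution (pvDiffWitness_solution) ∧ Pre_solution (pvDiffWitness_solution) ∧ D_solution (pvDiffWitness_solution) ∧ solution (pvDiffWitness_solution) = pvDiffWitnessOut_solution.1 ∧ solution_alt (pvDiffWitness_solution) = pvDiffWitnessOut_solution.2 ∧ pvDiffWitnessOut_solution.1 ≠ pvDiffWitnessOut_solution.2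
def Claim_exact_solution : Prop := ∀ (scores : List (List Int)), Dom_solution scores → Pre_solution scores → D_solution scores → solution scores ≠ solution_alt scores

-- ===== LEMMAS AND PROOFS =====

-- x- and y-score of an entry, as both Pythons read them
def pvX (s : List Int) : Int := PySem.List.pyGetD s 0 0
def pvY (s : List Int) : Int := PySem.List.pyGetD s 1 0
-- q strictly dominates p
abbrev pvBeats (p q : List Int) : Prop := pvX p < pvX q ∧ pvY p < pvY q
-- p is dominated by no member of t
abbrev pvNd (t : List (List Int)) (p : List Int) : Prop := ∀ q ∈ t, ¬ pvBeats p q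
-- order guaranteed between an earlier and a later element of the sorted list
abbrev pvR (a b : List Int) : Prop := pvX b < pvX a ∨ (pvX a = pvX b ∧ pvY a ≤ pvY b)

-- A's loop body and result extraction
def pvStep (tg : List Int) (ts : Int) (st : Sum Int (Int × Int)) (score : List Int) : Sum Int (Int × Int) :=
  match st with
  | Sum.inl v => Sum.inl v
  | Sum.inr (answer, bp) =>
    if pvX tg < pvX score ∧ pvY tg < pvY score then Sum.inl (-1 : Int)
    else if bp ≤ pvY score then
      Sum.inr (if ts < pvX score + pvY score then answer + 1 else answer, pvY score)
    else Sum.inr (answer, bp)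

def pvRes : Sum Int (Int × Int) → Int
  | Sum.inl v => v
  | Sum.inr (a, _) => a

-- A's count, with the running maximum made explicit
def pvCntA (ts : Int) : List (List Int) → Int → Int
  | [], _ => 0
  | e :: r, bp => (if bp ≤ pvY e ∧ ts < pvX e + pvY e then 1 else 0) + pvCntA ts r (max bp (pvY e))

def pvTg (scores : List (List Int)) : List Int := PySem.List.pyGetD scores 0 []
def pvSort (scores : List (List Int)) : List (List Int) :=
  PySem.List.sorted2 scores (fun x => -(PySem.List.pyGetD x 0 0)) (fun x => PySem.List.pyGetD x 1 0) false

theorem pvSorted2_eq {α : Type} (xs : List α) (k1 k2 : α → Int) :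
    PySem.List.sorted2 xs k1 k2 false = PySem.List.sorted xs (fun x => toLex (k1 x, k2 x)) false := by
  rw [PySem.List.sorted_eq_foldl_insertBy]
  have hb : (fun (a b : α) => decide ((fun x => toLex (k1 x, k2 x)) a < (fun x => toLex (k1 x, k2 x)) b))
      = fun a b => decide (k1 a < k1 b) || (!decide (k1 b < k1 a) && decide (k2 a < k2 b)) := by
    funext a b
    have h : (toLex (k1 a, k2 a) < toLex (k1 b, k2 b)) ↔ (k1 a < k1 b ∨ (¬ k1 b < k1 a ∧ k2 a < k2 b)) := by
      rw [Prod.Lex.toLex_lt_toLex]; dsimp only; omega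
    simp only [h]
    by_cases h1 : k1 a < k1 b <;> by_cases h2 : k1 b < k1 a <;> by_cases h3 : k2 a < k2 b <;>
      simp [h1, h2, h3]
  rw [hb]
  rfl

theorem pvSort_perm (scores : List (List Int)) : (pvSort scores).Perm scores := by
  unfold pvSort
  rw [pvSorted2_eq]
  exact PySem.List.sorted_perm scores _ false

theorem pvSort_pairwise (scores : List (List Int)) : (pvSort scores).Pairwise pvR := by
  unfold pvSort
  rw [pvSorted2_eq]
  refine (PySem.List.sorted_pairwise scores _).imp ?_
  intro a b h
  rw [Prod.Lex.toLex_le_toLex] at h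
  dsimp only at h
  unfold pvR pvX pvY
  omega

theorem pvFold_inl (tg : List Int) (ts : Int) (t : List (List Int)) (v : Int) :
    t.foldl (pvStep tg ts) (Sum.inl v) = Sum.inl v := by
  induction t with
  | nil => rfl
  | cons e r ih => simpa [pvStep] using ih

theorem pvFold_char (tg : List Int) (ts : Int) (t : List (List Int)) :
    ∀ a bp : Int, pvRes (t.foldl (pvStep tg ts) (Sum.inr (a, bp))) =
      if ∃ q ∈ t, pvBeats tg q then -1 else a + pvCntA ts t bp := by
  induction t with
  | nil => intro a bp; simp [pvCntA, pvRes]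
  | cons e r ih =>
    intro a bp
    rw [List.foldl_cons]
    by_cases hd : pvBeats tg e
    · rw [show pvStep tg ts (Sum.inr (a, bp)) e = Sum.inl (-1) from by simp [pvStep, hd]]
      rw [pvFold_inl]
      simp [pvRes, hd]
    · by_cases hbp : bp ≤ pvY e
      · rw [show pvStep tg ts (Sum.inr (a, bp)) e
            = Sum.inr ((if ts < pvX e + pvY e then a + 1 else a), pvY e) from by
          simp [pvStep, hd, hbp]]
        rw [ih]
        have hmax : max bp (pvY e) = pvY e := max_eq_right hbp
        simp only [pvCntA, hmax]
        by_cases hex : ∃ q ∈ r, pvBeats tg q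
        · simp [hex, hd]
        · simp only [if_neg hex]
          have : ¬ ∃ q ∈ e :: r, pvBeats tg q := by
            rintro ⟨q, hq, hdq⟩
            rcases List.mem_cons.mp hq with rfl | hq
            · exact hd hdq
            · exact hex ⟨q, hq, hdq⟩
          rw [if_neg this]
          split_ifs with h1 h2 <;> omega
      · rw [show pvStep tg ts (Sum.inr (a, bp)) e = Sum.inr (a, bp) from by
          simp [pvStep, hd, hbp]]
        rw [ih]
        have hmax : max bp (pvY e) = bp := max_eq_left (by omega)
        simp only [pvCntA, hmax]
        by_cases hex : ∃ q ∈ r, pvBeats tg q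
        · simp [hex, hd]
        · simp only [if_neg hex]
          have : ¬ ∃ q ∈ e :: r, pvBeats tg q := by
            rintro ⟨q, hq, hdq⟩
            rcases List.mem_cons.mp hq with rfl | hq
            · exact hd hdq
            · exact hex ⟨q, hq, hdq⟩
          rw [if_neg this]
          split_ifs with h1 <;> omega

theorem pvCntA_eq (ts : Int) (t : List (List Int)) :
    ∀ bp : Int, t.Pairwise pvR →
      pvCntA ts t bp = (t.countP (fun e => decide (bp ≤ pvY e ∧ pvNd t e ∧ ts < pvX e + pvY e)) : Int) := by
  induction t with
  | nil => intro bp _; simp [pvCntA]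
  | cons e r ih =>
    intro bp hp
    rw [List.pairwise_cons] at hp
    obtain ⟨hre, hr⟩ := hp
    have hndhead : pvNd (e :: r) e := by
      intro q hq
      rcases List.mem_cons.mp hq with rfl | hq
      · rintro ⟨h1, _⟩; exact lt_irrefl _ h1
      · have := hre q hq; unfold pvR at this; rintro ⟨h1, h2⟩; omega
    have htail : ∀ p ∈ r,
        (decide (max bp (pvY e) ≤ pvY p ∧ pvNd r p ∧ ts < pvX p + pvY p))
        = (decide (bp ≤ pvY p ∧ pvNd (e :: r) p ∧ ts < pvX p + pvY p)) := by
      intro p hpm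
      have hrel := hre p hpm
      unfold pvR at hrel
      rw [decide_eq_decide]
      constructor
      · rintro ⟨hm, hnd, hC⟩
        rw [max_le_iff] at hm
        refine ⟨hm.1, ?_, hC⟩
        intro q hq
        rcases List.mem_cons.mp hq with rfl | hq
        · have := hm.2; rintro ⟨h1, h2⟩; omega
        · exact hnd q hq
      · rintro ⟨hm, hnd, hC⟩
        have hne := hnd e List.mem_cons_self
        refine ⟨?_, fun q hq => hnd q (List.mem_cons_of_mem _ hq), hC⟩
        rw [max_le_iff]
        refine ⟨hm, ?_⟩
        by_contra hlt
        rcases hrel with h | ⟨h1, h2⟩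
        · exact hne ⟨h, by omega⟩
        · omega
    have hcongr : r.countP (fun p => decide (max bp (pvY e) ≤ pvY p ∧ pvNd r p ∧ ts < pvX p + pvY p))
        = r.countP (fun p => decide (bp ≤ pvY p ∧ pvNd (e :: r) p ∧ ts < pvX p + pvY p)) := by
      rw [List.countP_eq_length_filter, List.countP_eq_length_filter, List.filter_congr htail]
    have hh : (decide (bp ≤ pvY e ∧ pvNd (e :: r) e ∧ ts < pvX e + pvY e) = true)
        ↔ (bp ≤ pvY e ∧ ts < pvX e + pvY e) := by
      rw [decide_eq_true_iff]
      exact ⟨fun ⟨h1, _, h3⟩ => ⟨h1, h3⟩, fun ⟨h1, h3⟩ => ⟨h1, hndhead, h3⟩⟩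
    unfold pvCntA
    rw [ih (max bp (pvY e)) hr, hcongr, List.countP_cons]
    by_cases hc : bp ≤ pvY e ∧ ts < pvX e + pvY e
    · rw [if_pos hc, if_pos (hh.mpr hc)]
      push_cast
      ring
    · rw [if_neg hc, if_neg (fun hcc => hc (hh.mp hcc))]
      push_cast
      ring

theorem pvCountP_strict {α : Type} (l : List α) (p q : α → Bool)
    (h : ∀ x ∈ l, p x = true → q x = true) (x : α) (hx : x ∈ l) (hq : q x = true) (hp : p x = false) :
    l.countP p < l.countP q := by
  revert h hx
  induction l with
  | nil => intro _ hx; cases hx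
  | cons a t ih =>
    intro h hx
    rw [List.countP_cons, List.countP_cons]
    have hmono : t.countP p ≤ t.countP q :=
      List.countP_mono_left (fun y hy => h y (List.mem_cons_of_mem _ hy))
    rcases List.mem_cons.mp hx with rfl | hx'
    · rw [if_neg (by simp [hp]), if_pos hq]
      omega
    · have hlt := ih (fun y hy => h y (List.mem_cons_of_mem _ hy)) hx'
      by_cases hpa : p a = true
      · rw [if_pos hpa, if_pos (h a List.mem_cons_self hpa)]
        omega
      · rw [if_neg hpa]
        split_ifs <;> omega

theorem pvNd_iff_of_perm {t s : List (List Int)} (h : t.Perm s) (p : List Int) :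
    pvNd t p ↔ pvNd s p := by
  unfold pvNd
  constructor <;> intro hh q hq
  · exact hh q (h.mem_iff.mpr hq)
  · exact hh q (h.mem_iff.mp hq)

theorem pvX_getD (p : List Int) : pvX p = p.getD 0 0 := by
  unfold pvX
  rw [PySem.List.pyGetD_zero]

theorem pvY_getD (p : List Int) : pvY p = p.getD 1 0 := by
  unfold pvY
  simpa using PySem.List.pyGetD_natCast (n := 1) (xs := p) (d := (0 : Int))

theorem pvNotDom_iff (p q : List Int) :
    ¬ pvBeats p q ↔ (q.getD 0 0 ≤ p.getD 0 0 ∨ q.getD 1 0 ≤ p.getD 1 0) := by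
  unfold pvBeats
  rw [pvX_getD, pvX_getD, pvY_getD, pvY_getD]
  omega

theorem pvSolution_char (scores : List (List Int)) :
    solution scores = if ∃ q ∈ pvSort scores, pvBeats (pvTg scores) q then -1
      else 1 + pvCntA (pvTg scores).sum (pvSort scores) 0 := by
  rw [← pvFold_char (pvTg scores) (pvTg scores).sum (pvSort scores) 1 0]
  rfl

theorem pvAlt_char (scores : List (List Int)) :
    solution_alt scores = if ∃ q ∈ pvSort scores, pvBeats (pvTg scores) q then -1
      else 1 + ((pvSort scores).countP (fun p => decide ((pvTg scores).sum < pvX p + pvY p ∧ pvNd (pvSort scores) p)) : Int) := by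
  have hany : ∀ p : List Int, ((pvSort scores).any (fun q => decide (pvX p < pvX q) && decide (pvY p < pvY q)))
      = decide (¬ pvNd (pvSort scores) p) := by
    intro p
    rw [Bool.eq_iff_iff]
    simp [List.any_eq_true, pvNd, pvBeats]
  have halt : solution_alt scores
      = if (pvSort scores).any (fun q => decide (pvX (pvTg scores) < pvX q) && decide (pvY (pvTg scores) < pvY q)) then (-1 : Int)
        else 1 + (((pvSort scores).filter (fun p => decide ((pvTg scores).sum < pvX p + pvY p) &&
            !((pvSort scores).any (fun q => decide (pvX p < pvX q) && decide (pvY p < pvY q))))).length : Int) := rfl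
  rw [halt]
  simp only [hany]
  have hcond : (decide (¬ pvNd (pvSort scores) (pvTg scores)) = true) ↔ (∃ q ∈ pvSort scores, pvBeats (pvTg scores) q) := by
    simp [pvNd]
  have hfc : ∀ p ∈ pvSort scores,
      (decide ((pvTg scores).sum < pvX p + pvY p) && !decide (¬ pvNd (pvSort scores) p))
      = decide ((pvTg scores).sum < pvX p + pvY p ∧ pvNd (pvSort scores) p) := by
    intro p _
    rw [Bool.eq_iff_iff]
    simp
    intro _
    unfold pvNd pvBeats
    constructor
    · intro h q hq hdq
      rcases hdq with ⟨h1, h2⟩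
      have := h q hq h1
      omega
    · intro h q hq h1
      have := h q hq
      omega
  rw [List.filter_congr hfc]
  by_cases hex : ∃ q ∈ pvSort scores, pvBeats (pvTg scores) q
  · rw [if_pos (hcond.mpr hex), if_pos hex]
  · rw [if_neg (fun hh => hex (hcond.mp hh)), if_neg hex, List.countP_eq_length_filter]

theorem pvMain (scores : List (List Int)) (hD : ¬ D_solution scores) :
    solution scores = solution_alt scores := by
  rw [pvSolution_char, pvAlt_char]
  by_cases hex : ∃ q ∈ pvSort scores, pvBeats (pvTg scores) q
  · rw [if_pos hex, if_pos hex]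
  · rw [if_neg hex, if_neg hex]
    have hperm := pvSort_perm scores
    have htg : pvTg scores = scores.getD 0 [] := by
      unfold pvTg; rw [PySem.List.pyGetD_zero]
    rw [pvCntA_eq _ _ 0 (pvSort_pairwise scores)]
    have hpt : ∀ p ∈ pvSort scores,
        (decide ((0 : Int) ≤ pvY p ∧ pvNd (pvSort scores) p ∧ (pvTg scores).sum < pvX p + pvY p))
        = (decide ((pvTg scores).sum < pvX p + pvY p ∧ pvNd (pvSort scores) p)) := by
      intro p hpm
      rw [decide_eq_decide]
      constructor
      · rintro ⟨_, hnd, hC⟩; exact ⟨hC, hnd⟩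
      · rintro ⟨hC, hnd⟩
        refine ⟨?_, hnd, hC⟩
        by_contra hneg
        apply hD
        rw [pvY_getD] at hneg
        rw [htg, pvX_getD, pvY_getD] at hC
        refine ⟨p, hperm.mem_iff.mp hpm, by omega, hC, ?_⟩
        intro q hq
        constructor
        · have hq1 : ¬ pvBeats (pvTg scores) q :=
            fun hdq => hex ⟨q, hperm.mem_iff.mpr hq, hdq⟩
          rw [pvNotDom_iff, htg] at hq1
          exact hq1
        · exact (pvNotDom_iff p q).mp (((pvNd_iff_of_perm hperm p).mp hnd) q hq)
    congr 2
    rw [List.countP_eq_length_filter, List.countP_eq_length_filter, List.filter_congr hpt]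

theorem pvExact (scores : List (List Int)) (hD : D_solution scores) :
    solution scores ≠ solution_alt scores := by
  obtain ⟨p, hpmem, hy, hsum, hall⟩ := hD
  have hperm := pvSort_perm scores
  have htg : pvTg scores = scores.getD 0 [] := by
    unfold pvTg; rw [PySem.List.pyGetD_zero]
  have hex : ¬ ∃ q ∈ pvSort scores, pvBeats (pvTg scores) q := by
    rintro ⟨q, hq, hdq⟩
    have h1 := (hall q (hperm.mem_iff.mp hq)).1
    rw [← htg] at h1
    exact (pvNotDom_iff (pvTg scores) q).mpr h1 hdq
  rw [pvSolution_char, pvAlt_char, if_neg hex, if_neg hex,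
    pvCntA_eq _ _ 0 (pvSort_pairwise scores)]
  have hndp : pvNd (pvSort scores) p := by
    refine (pvNd_iff_of_perm hperm p).mpr ?_
    intro q hq
    exact (pvNotDom_iff p q).mpr (hall q hq).2
  have hlt := pvCountP_strict (pvSort scores)
    (fun e => decide ((0 : Int) ≤ pvY e ∧ pvNd (pvSort scores) e ∧ (pvTg scores).sum < pvX e + pvY e))
    (fun e => decide ((pvTg scores).sum < pvX e + pvY e ∧ pvNd (pvSort scores) e))
    (by
      intro x _ hx
      rw [decide_eq_true_iff] at hx
      rw [decide_eq_true_iff]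
      exact ⟨hx.2.2, hx.2.1⟩)
    p (hperm.mem_iff.mpr hpmem)
    (by
      rw [decide_eq_true_iff]
      exact ⟨by rw [htg, pvX_getD, pvY_getD]; exact hsum, hndp⟩)
    (by
      rw [decide_eq_false_iff_not]
      rintro ⟨h0, -⟩
      rw [pvY_getD] at h0
      omega)
  intro heq
  omega

-- ===== VERDICT =====
theorem solution_spec : Claim_unchanged_solution := by
  intro scores _ _ hD
  exact pvMain scores hD

theorem solution_changed : Claim_changed_solution := by
  unfold Claim_changed_solution; decide

theorem solution_tight : Claim_exact_solution := by
  intro scores _ _ hD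
  exact pvExact scores hD
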